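-- pv_equiv track=rewrite | github.com/fralvarop/python | test_tasks/task 1.py | solution
-- ===== SOURCE A (Python) =====
-- def solution(A):
--     rotations = []
--     # We assess what would happen if we chose every single die as the goal
--     for die in A:
--         goal = die
--         opposite = 7 - goal
--         moves = 0
--         # For the defined goal, calculate the distance (in moves) from it
--         for item in A:
--             if (item == goal):
--                 pass
--             elif (item == opposite):
--                 moves += 2
--             else:
--                 moves += 1
--         # Collect all possible solutions
--         rotations.append(moves)
--     # Pick the minimum (as desired)
--     return min(rotations)
-- ===== SOURCE B (Python) =====
-- def solution(A):
--     counts = {}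
--     for x in A:
--         counts[x] = counts.get(x, 0) + 1
--     n = len(A)
--     return min(n - c + counts.get(7 - g, 0) for g, c in counts.items())
-- ===== Notes on version B (the rewrite author's own statement) =====
-- stated objective: faster
-- what changed: Replaces the quadratic nested scan (re-counting moves for every die) with one frequency-counting pass and a minimum over the distinct values via moves = n - count[g] + count[7-g].
import Mathlib
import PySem

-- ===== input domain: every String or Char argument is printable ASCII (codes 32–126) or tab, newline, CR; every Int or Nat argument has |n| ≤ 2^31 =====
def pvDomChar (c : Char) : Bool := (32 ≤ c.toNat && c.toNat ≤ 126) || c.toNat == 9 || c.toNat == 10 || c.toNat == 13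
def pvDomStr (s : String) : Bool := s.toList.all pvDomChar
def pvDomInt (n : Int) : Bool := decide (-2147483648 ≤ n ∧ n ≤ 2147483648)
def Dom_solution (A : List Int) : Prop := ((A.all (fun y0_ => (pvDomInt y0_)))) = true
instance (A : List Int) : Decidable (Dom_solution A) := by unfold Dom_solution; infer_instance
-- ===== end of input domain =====

-- B replaces A's quadratic nested scan with one frequency-counting pass (objective: faster, asymptotic).


-- ===== PORT A =====
-- inner loop: moves accumulated over A for a fixed goal
def solution (A : List Int) : Int :=
  let rotations := A.foldl (fun acc die =>
    let goal := die
    let opposite := 7 - goal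
    let moves := A.foldl (fun moves item =>
      if item == goal then moves
      else if item == opposite then moves + 2
      else moves + 1) 0
    acc ++ [moves]) []
  (PySem.List.min? rotations (fun x => x)).getD 0

-- ===== PORT B =====
def solution_alt (A : List Int) : Int :=
  let counts := A.foldl (fun d x => d.insert x (d.getD x 0 + 1)) PySem.Dict.empty
  let n : Int := A.length
  (PySem.List.min? (counts.items.map (fun gc => n - gc.2 + counts.getD (7 - gc.1) 0))
    (fun x => x)).getD 0

-- ===== PRECONDITION & SPEC =====
-- A (and B) call min() on a list as long as A, which raises ValueError on the empty list.
def Pre_solution (A : List Int) : Prop := A ≠ []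
instance (A : List Int) : Decidable (Pre_solution A) := by unfold Pre_solution; infer_instance
def pvWitness_solution : List Int := [1, 6, 2, 2]
def Spec_solution (A : List Int) (out : Int) : Prop := out = solution_alt A
instance (A : List Int) (out : Int) : Decidable (Spec_solution A out) := by unfold Spec_solution; infer_instance

-- ===== CLAIM (what is proved, stated in full; the proofs are below) =====
def Claim_equal_solution : Prop := ∀ (A : List Int), Dom_solution A → Pre_solution A → Spec_solution A (solution A)

-- ===== LEMMAS AND PROOFS =====

-- the per-goal move weight
def pvW (g : Int) (item : Int) : Int := if item = g then 0 else if item = 7 - g then 2 else 1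

-- the per-goal cost in closed form
def pvF (A : List Int) (g : Int) : Int := A.length - A.count g + A.count (7 - g)

lemma pvInner_aux (A : List Int) (g : Int) (init : Int) :
    A.foldl (fun moves item =>
      if item == g then moves
      else if item == (7 - g) then moves + 2
      else moves + 1) init = init + pvF A g := by
  induction A generalizing init with
  | nil => simp [pvF]
  | cons x t ih =>
    have h7 : (7 : Int) - g ≠ g := by omega
    simp only [List.foldl_cons, ih, pvF, List.count_cons, List.length_cons]
    by_cases hx : x = g
    · subst hx
      simp only [BEq.rfl, if_true, beq_iff_eq, h7.symm, if_false]
      simp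
    · by_cases hx2 : x = 7 - g
      · subst hx2
        simp only [beq_iff_eq, h7, if_false, if_true]
        simp
        ring
      · simp only [beq_iff_eq, hx, hx2, if_false]
        simp
        ring

lemma pvInner (A : List Int) (g : Int) :
    A.foldl (fun moves item =>
      if item == g then moves
      else if item == (7 - g) then moves + 2
      else moves + 1) 0 = pvF A g := by
  simpa using pvInner_aux A g 0

lemma pvRotations (A : List Int) :
    A.foldl (fun acc die =>
      acc ++ [A.foldl (fun moves item =>
        if item == die then moves
        else if item == (7 - die) then moves + 2
        else moves + 1) 0]) [] = A.map (pvF A) := by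
  rw [PySem.List.foldl_append_singleton_eq_map]
  simp only [List.nil_append]
  exact List.map_congr_left (fun x _ => pvInner A x)

lemma pvCands (A : List Int) :
    (A.foldl (fun d x => d.insert x (d.getD x 0 + 1)) PySem.Dict.empty).items.map
      (fun gc => (A.length : Int) - gc.2 +
        (A.foldl (fun d x => d.insert x (d.getD x 0 + 1)) PySem.Dict.empty).getD (7 - gc.1) 0)
      = (PySem.Set.ofList A).map (pvF A) := by
  rw [PySem.Dict.foldl_insert_getD_add_one_eq_counter]
  rw [PySem.Dict.items_counter]
  rw [List.map_map]
  refine List.map_congr_left (fun g hg => ?_)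
  simp [PySem.Dict.getD_counter, pvF]

-- the value of min() depends only on membership
lemma pvMin_eq_of_mem_iff (xs ys : List Int) (h : ∀ v : Int, v ∈ xs ↔ v ∈ ys)
    (hne : xs ≠ []) :
    (PySem.List.min? xs (fun x => x)).getD 0 = (PySem.List.min? ys (fun x => x)).getD 0 := by
  have hyne : ys ≠ [] := by
    intro he; subst he
    cases xs with
    | nil => exact hne rfl
    | cons a t => exact absurd ((h a).mp (List.mem_cons_self)) (List.not_mem_nil)
  obtain ⟨m, hm⟩ := Option.ne_none_iff_exists'.mp
    (fun hc => hne ((PySem.List.min?_eq_none_iff xs (fun x => x)).mp hc))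
  obtain ⟨m', hm'⟩ := Option.ne_none_iff_exists'.mp
    (fun hc => hyne ((PySem.List.min?_eq_none_iff ys (fun x => x)).mp hc))
  have h1 : m ≤ m' := PySem.List.min?_isMin hm m' ((h m').mpr (PySem.List.min?_mem hm'))
  have h2 : m' ≤ m := PySem.List.min?_isMin hm' m ((h m).mp (PySem.List.min?_mem hm))
  simp [hm, hm', le_antisymm h1 h2]

-- ===== VERDICT (by name: the statement is the Claim_ definition above) =====
theorem solution_spec : Claim_equal_solution := by
  intro A _ hpre
  unfold Spec_solution solution solution_alt
  simp only []
  rw [pvRotations, pvCands]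
  apply pvMin_eq_of_mem_iff
  · intro v
    simp only [List.mem_map]
    constructor
    · rintro ⟨x, hx, rfl⟩; exact ⟨x, (PySem.Set.mem_ofList A x).mpr hx, rfl⟩
    · rintro ⟨x, hx, rfl⟩; exact ⟨x, (PySem.Set.mem_ofList A x).mp hx, rfl⟩
  · simpa using hpre
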